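-- pv_equiv track=rewrite | github.com/ShubhamAnandJain/MWP-CS229 | analysis data + tools/wrong_eq.py | convert
-- ===== SOURCE A (Python) =====
-- def convert(equation):
--   operators = ['+', '-', '/', '*', '(', ')']
--   numbers = ['0', '1', '2', '3', '4', '5', '6', '7', '8', '9', '.']
--   num_lst = []
--
--   fin_eq = ''
--   i = 0
--
--   while(i < len(equation)):
--     curr_char = equation[i]
--     if curr_char in operators:
--       fin_eq += curr_char
--       i += 1
--     else:
--       j = i
--       num_str = ''
--       while((j<len(equation)) and (equation[j] not in operators)):
--         num_str += equation[j]
--         j += 1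
--       # num_lst.append(float(num_str))
--       fin_eq += 'X'
--       i = j
--   return fin_eq, num_lst
-- ===== SOURCE B (Python) =====
-- def convert(equation):
--   operators = '+-/*()'
--   out = []
--   in_run = False
--   for c in equation:
--     if c in operators:
--       out.append(c)
--       in_run = False
--     else:
--       if not in_run:
--         out.append('X')
--       in_run = True
--   return ''.join(out), []
-- ===== Notes on version B (the rewrite author's own statement) =====
-- stated objective: faster
-- what changed: Replaces the nested two-index scan (inner while locating the end of each number run) with a single flat pass driven by a boolean run-state flag, appending output characters to a list joined once at the end; the unused numbers machinery is dropped.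
import Mathlib
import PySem

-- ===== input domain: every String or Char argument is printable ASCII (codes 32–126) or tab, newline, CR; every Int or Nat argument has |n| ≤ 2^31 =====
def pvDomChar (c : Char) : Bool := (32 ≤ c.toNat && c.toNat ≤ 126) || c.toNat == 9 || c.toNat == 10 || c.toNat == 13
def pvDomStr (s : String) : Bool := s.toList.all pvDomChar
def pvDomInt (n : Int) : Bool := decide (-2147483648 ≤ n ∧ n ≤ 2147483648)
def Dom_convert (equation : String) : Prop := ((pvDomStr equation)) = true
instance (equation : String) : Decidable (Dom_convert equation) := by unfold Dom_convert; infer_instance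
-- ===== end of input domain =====

-- B replaces A's nested two-index scan with one flat pass carrying an 'inside a run' flag (simpler; the unused numbers list stays empty).

-- ===== PORT A =====
def pvOps : List Char := ['+', '-', '/', '*', '(', ')']

-- A's outer while: on an operator emit it and advance one; otherwise the inner
-- while (here dropWhile) advances j past the whole non-operator run and one 'X' is emitted.
def convertGo : List Char → List Char
  | [] => []
  | c :: rest =>
    if c ∈ pvOps then c :: convertGo rest
    else 'X' :: convertGo (rest.dropWhile (fun d => ¬ d ∈ pvOps))
termination_by cs => cs.length
decreasing_by
  · simp
  · exact Nat.lt_succ_of_le (List.length_dropWhile_le _ _)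

def convert (equation : String) : String × List Int :=
  (String.mk (convertGo equation.toList), [])

-- ===== PORT B =====
-- one pass with a Bool state: operators pass through and clear the flag;
-- the first char of a run emits 'X' and sets it; later run chars emit nothing.
def convertAltGo : List Char → Bool → List Char
  | [], _ => []
  | c :: rest, inRun =>
    if c ∈ pvOps then c :: convertAltGo rest false
    else if inRun then convertAltGo rest true
    else 'X' :: convertAltGo rest true

def convert_alt (equation : String) : String × List Int :=
  (String.mk (convertAltGo equation.toList false), [])

-- ===== PRECONDITION & SPEC =====
def Spec_convert (equation : String) (out : String × List Int) : Prop := out = convert_alt equation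
instance (equation : String) (out : String × List Int) : Decidable (Spec_convert equation out) := by unfold Spec_convert; infer_instance

-- ===== CLAIM (what is proved, stated in full; the proofs are below) =====
def Claim_equal_convert : Prop := ∀ (equation : String), Dom_convert equation → Spec_convert equation (convert equation)

-- ===== LEMMAS AND PROOFS =====

-- B with the flag set is B after skipping the rest of the current run.
theorem altGo_true (cs : List Char) :
    convertAltGo cs true = convertAltGo (cs.dropWhile (fun d => ¬ d ∈ pvOps)) false := by
  induction cs with
  | nil => simp [convertAltGo]
  | cons c rest ih =>
    by_cases h : c ∈ pvOps
    · simp [convertAltGo, List.dropWhile, h]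
    · simp [convertAltGo, List.dropWhile, h, ih]

theorem go_eq (cs : List Char) : convertGo cs = convertAltGo cs false := by
  induction cs using convertGo.induct with
  | case1 => simp [convertGo, convertAltGo]
  | case2 c rest h ih => simp [convertGo, convertAltGo, h, ih]
  | case3 c rest h ih =>
    simp only [convertGo, convertAltGo, h, if_false, altGo_true]
    simp only [decide_not] at ih ⊢
    simp [ih]

-- ===== VERDICT (by name: the statement is the Claim_ definition above) =====
theorem convert_spec : Claim_equal_convert := by
  intro equation _
  unfold Spec_convert convert convert_alt
  rw [go_eq]
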